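-- pv_equiv track=rewrite | github.com/ravish-oo/arc-agi-oo | src/canonicalization.py | flip_anti
-- ===== SOURCE A (Python) =====
-- def flip_anti(g: list[list[int]]) -> list[list[int]]:
--     """
--     Anti-diagonal reflection (swap along bottom-left to top-right diagonal).
--
--     Maps (r, c) → (W-1-c, H-1-r) for H×W grid.
--     Result dimensions: W×H (swapped like transpose).
--
--     This is equivalent to: transpose ∘ rot180, or rot180 ∘ transpose.
--
--     Args:
--         g: Input grid (H×W)
--
--     Returns:
--         Reflected grid (W×H)
--
--     Raises:
--         ValueError: If grid is ragged
--     """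
--     if not g:
--         return []
--
--     # Validate rectangularity
--     H = len(g)
--     W = len(g[0])
--     for row in g:
--         if len(row) != W:
--             raise ValueError("Grid must be rectangular (all rows same length)")
--
--     # Create W×H output (dimensions swapped)
--     out = [[0] * H for _ in range(W)]
--
--     # Anti-diagonal mapping: (r,c) → (W-1-c, H-1-r)
--     for r in range(H):
--         for c in range(W):
--             out[W - 1 - c][H - 1 - r] = g[r][c]
--
--     return out
-- ===== SOURCE B (Python) =====
-- def flip_anti(g: list[list[int]]) -> list[list[int]]:
--     if not g:
--         return []
--     W = len(g[0])
--     for row in g: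
--         if len(row) != W:
--             raise ValueError("Grid must be rectangular (all rows same length)")
--     # anti-diagonal reflection = transpose of the 180-degree rotation
--     return [list(col) for col in zip(*[row[::-1] for row in g[::-1]])]
-- ===== Notes on version B (the rewrite author's own statement) =====
-- stated objective: idiomatic
-- what changed: Replaces the preallocated output grid and nested per-cell index-arithmetic writes with a whole-row pipeline: reverse the row order and each row (rot180), then transpose with zip.
import Mathlib
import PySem

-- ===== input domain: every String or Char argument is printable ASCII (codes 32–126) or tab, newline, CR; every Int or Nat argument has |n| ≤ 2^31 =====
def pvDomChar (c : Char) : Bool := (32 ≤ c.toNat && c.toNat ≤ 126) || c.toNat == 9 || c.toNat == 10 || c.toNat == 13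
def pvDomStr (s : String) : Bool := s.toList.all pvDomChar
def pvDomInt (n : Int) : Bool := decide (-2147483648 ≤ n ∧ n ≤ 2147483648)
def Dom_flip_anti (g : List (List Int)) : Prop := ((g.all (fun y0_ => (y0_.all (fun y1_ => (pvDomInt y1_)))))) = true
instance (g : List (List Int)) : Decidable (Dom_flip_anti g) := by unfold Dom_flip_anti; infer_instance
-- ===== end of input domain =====

-- B computes the anti-diagonal reflection as transpose ∘ rot180 (whole-row/zip pipeline)
-- instead of A's preallocated grid with nested index-arithmetic writes; return values proved equal.

-- ===== PORT A =====
-- literal port of A: validate rectangularity, preallocate a W×H grid of zeros,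
-- then the nested loops write out[W-1-c][H-1-r] = g[r][c]
def flip_anti (g : List (List Int)) : List (List Int) :=
  if g = [] then []
  else
    let H := g.length
    let W := (g.headI).length
    if g.all (fun row => row.length == W) then
      let out0 := (List.range W).map (fun _ => List.replicate H (0 : Int))
      (List.range H).foldl (fun out r =>
        (List.range W).foldl (fun out c =>
          out.modify (W - 1 - c) (fun row => row.set (H - 1 - r) ((g.getD r []).getD c 0))) out) out0
    else []  -- Python raises ValueError here; excluded by Pre_flip_anti

-- ===== PORT B =====
-- port of zip(*rows): repeatedly take all heads, stop when any row is exhausted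
def pvZipStar (rows : List (List Int)) : List (List Int) :=
  if h : rows ≠ [] ∧ rows.all (fun r => !r.isEmpty) then
    (rows.map List.headI) :: pvZipStar (rows.map List.tail)
  else []
termination_by rows.headI.length
decreasing_by
  cases rows with
  | nil => exact absurd rfl h.1
  | cons a l =>
    have ha : a ≠ [] := by
      have := h.2; simp [List.all_cons] at this
      simpa [List.isEmpty_iff] using this.1
    cases a with
    | nil => exact absurd rfl ha
    | cons x xs => simp [List.headI]

def flip_anti_alt (g : List (List Int)) : List (List Int) :=
  if g = [] then []
  else
    let W := (g.headI).length
    if g.all (fun row => row.length == W) then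
      pvZipStar ((g.reverse).map List.reverse)
    else []  -- Python raises ValueError here; excluded by Pre_flip_anti

-- ===== PRECONDITION & SPEC =====
-- Pre_ excludes exactly the ragged grids, on which Python A raises ValueError.
def Pre_flip_anti (g : List (List Int)) : Prop :=
  ∀ row ∈ g, row.length = (g.headI).length
instance (g : List (List Int)) : Decidable (Pre_flip_anti g) := by unfold Pre_flip_anti; infer_instance

def pvWitness_flip_anti : List (List Int) := [[1, 2, 3], [4, 5, 6]]

def Spec_flip_anti (g : List (List Int)) (out : List (List Int)) : Prop := out = flip_anti_alt g
instance (g : List (List Int)) (out : List (List Int)) : Decidable (Spec_flip_anti g out) := by unfold Spec_flip_anti; infer_instance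

-- ===== CLAIM (what is proved, stated in full; the proofs are below) =====
def Claim_equal_flip_anti : Prop := ∀ (g : List (List Int)), Dom_flip_anti g → Pre_flip_anti g → Spec_flip_anti g (flip_anti g)

-- ===== LEMMAS AND PROOFS =====

theorem pv_tail_getD (r : List Int) (j : Nat) : r.tail.getD j 0 = r.getD (j+1) 0 := by
  cases r <;> simp

theorem pv_rev_getD (l : List Int) (i : Nat) (h : i < l.length) :
    l.reverse.getD i 0 = l.getD (l.length - 1 - i) 0 := by
  have h' : i < l.reverse.length := by simpa using h
  rw [List.getD_eq_getElem _ _ h', List.getElem_reverse, List.getD_eq_getElem _ _ (by omega)]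

theorem pv_headI_getD (r : List Int) (h : r ≠ []) : r.getD 0 0 = r.headI := by
  cases r with
  | nil => exact absurd rfl h
  | cons a l => simp [List.headI]

-- characterization of the zip(*rows) port for nonempty rectangular input
theorem pvZipStar_char : ∀ (m : Nat) (rows : List (List Int)), rows ≠ [] →
    (∀ r ∈ rows, r.length = m) →
    pvZipStar rows = (List.range m).map (fun j => rows.map (fun r => r.getD j 0)) := by
  intro m
  induction m with
  | zero =>
    intro rows hne hlen
    rw [pvZipStar, dif_neg]
    · simp
    · rintro ⟨-, h2⟩
      cases rows with
      | nil => exact absurd rfl hne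
      | cons a l =>
        have ha : a = [] := List.length_eq_zero_iff.mp (hlen a (by simp))
        rw [ha] at h2
        simp at h2
  | succ m ih =>
    intro rows hne hlen
    have hall : rows.all (fun r => !r.isEmpty) = true := by
      simp only [List.all_eq_true]
      intro r hr
      have hl := hlen r hr
      cases r with
      | nil => simp at hl
      | cons a l => simp
    rw [pvZipStar, dif_pos ⟨hne, hall⟩]
    have htne : rows.map List.tail ≠ [] := by
      simpa using hne
    have htlen : ∀ r ∈ rows.map List.tail, r.length = m := by
      intro r hr
      simp only [List.mem_map] at hr
      obtain ⟨s, hs, rfl⟩ := hr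
      have := hlen s hs
      simp [this]
    rw [ih _ htne htlen, List.range_succ_eq_map]
    simp only [List.map_cons, List.map_map]
    congr 1
    · apply List.map_congr_left
      intro r hr
      have hrne : r ≠ [] := by
        intro h; subst h; simpa using hlen [] hr
      simpa using (pv_headI_getD r hrne).symm
    · apply List.map_congr_left
      intro j _
      simp only [Function.comp]
      apply List.map_congr_left
      intro r _
      exact pv_tail_getD r j

-- the inner loop: after c = 0 .. n-1, rows W-n .. W-1 have been written at column H-1-r
theorem pv_inner (W H r : Nat) (gr : List Int) (out : List (List Int)) (hout : out.length = W) :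
    ∀ n, n ≤ W →
      ((List.range n).foldl (fun o c =>
          o.modify (W - 1 - c) (fun row => row.set (H - 1 - r) (gr.getD c 0))) out).length = W ∧
      ∀ i, i < W →
        ((List.range n).foldl (fun o c =>
            o.modify (W - 1 - c) (fun row => row.set (H - 1 - r) (gr.getD c 0))) out).getD i [] =
          if W - n ≤ i then (out.getD i []).set (H - 1 - r) (gr.getD (W - 1 - i) 0)
          else out.getD i [] := by
  intro n
  induction n with
  | zero =>
    intro _
    refine ⟨by simpa using hout, ?_⟩
    intro i hi
    rw [if_neg (by omega)]
    simp
  | succ n ihn =>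
    intro hn
    obtain ⟨hlen, hget⟩ := ihn (by omega)
    rw [List.range_succ, List.foldl_append, List.foldl_cons, List.foldl_nil]
    set prev := (List.range n).foldl (fun o c =>
        o.modify (W - 1 - c) (fun row => row.set (H - 1 - r) (gr.getD c 0))) out with hprev
    refine ⟨by simpa using hlen, ?_⟩
    intro i hi
    have hi' : i < prev.length := by omega
    have hm : i < (prev.modify (W - 1 - n) (fun row => row.set (H - 1 - r) (gr.getD n 0))).length := by
      simpa using hi'
    rw [List.getD_eq_getElem _ _ hm, List.getElem_modify]
    by_cases hc : W - 1 - n = i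
    · rw [if_pos hc]
      have h1 : prev[i] = prev.getD i [] := (List.getD_eq_getElem _ _ hi').symm
      rw [h1, hget i hi, if_neg (by omega), if_pos (by omega)]
      have : W - 1 - i = n := by omega
      rw [this]
    · rw [if_neg hc]
      have h1 : prev[i] = prev.getD i [] := (List.getD_eq_getElem _ _ hi').symm
      rw [h1, hget i hi]
      by_cases h2 : W - n ≤ i
      · rw [if_pos h2, if_pos (by omega)]
      · rw [if_neg h2, if_neg (by omega)]

-- the outer loop: after r = 0 .. m-1, columns H-m .. H-1 carry the reflected values
theorem pv_outer (g : List (List Int)) (H W : Nat)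
    (out : List (List Int)) (hout : out.length = W) (hrows : ∀ row ∈ out, row.length = H) :
    ∀ m, m ≤ H →
      ((List.range m).foldl (fun o r => (List.range W).foldl (fun o c =>
          o.modify (W - 1 - c) (fun row => row.set (H - 1 - r) ((g.getD r []).getD c 0))) o) out).length = W ∧
      (∀ row ∈ (List.range m).foldl (fun o r => (List.range W).foldl (fun o c =>
          o.modify (W - 1 - c) (fun row => row.set (H - 1 - r) ((g.getD r []).getD c 0))) o) out, row.length = H) ∧
      ∀ i, i < W → ∀ j, j < H →
        (((List.range m).foldl (fun o r => (List.range W).foldl (fun o c =>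
            o.modify (W - 1 - c) (fun row => row.set (H - 1 - r) ((g.getD r []).getD c 0))) o) out).getD i []).getD j 0 =
          if H - m ≤ j then (g.getD (H - 1 - j) []).getD (W - 1 - i) 0
          else ((out.getD i []).getD j 0) := by
  intro m
  induction m with
  | zero =>
    intro _
    refine ⟨by simpa using hout, by simpa using hrows, ?_⟩
    intro i hi j hj
    rw [if_neg (by omega)]
    simp
  | succ m ihm =>
    intro hm
    obtain ⟨hlen, hrlen, hget⟩ := ihm (by omega)
    rw [List.range_succ, List.foldl_append, List.foldl_cons, List.foldl_nil]
    set prev := (List.range m).foldl (fun o r => (List.range W).foldl (fun o c =>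
        o.modify (W - 1 - c) (fun row => row.set (H - 1 - r) ((g.getD r []).getD c 0))) o) out with hprev
    obtain ⟨ilen, iget⟩ := pv_inner W H m (g.getD m []) prev hlen W (le_refl W)
    have iget' : ∀ i, i < W →
        ((List.range W).foldl (fun o c =>
            o.modify (W - 1 - c) (fun row => row.set (H - 1 - m) ((g.getD m []).getD c 0))) prev).getD i [] =
          (prev.getD i []).set (H - 1 - m) ((g.getD m []).getD (W - 1 - i) 0) := by
      intro i hi
      rw [iget i hi, if_pos (by omega)]
    refine ⟨ilen, ?_, ?_⟩
    · intro row hrow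
      obtain ⟨k, hk, hkeq⟩ := List.mem_iff_getElem.mp hrow
      have hkW : k < W := by omega
      have : row = (prev.getD k []).set (H - 1 - m) ((g.getD m []).getD (W - 1 - k) 0) := by
        rw [← hkeq, ← List.getD_eq_getElem _ _ hk, iget' k hkW]
      rw [this, List.length_set]
      have hkp : k < prev.length := by omega
      have : prev.getD k [] = prev[k] := List.getD_eq_getElem _ _ hkp
      rw [this]
      exact hrlen _ (List.getElem_mem hkp)
    · intro i hi j hj
      rw [iget' i hi]
      have hip : i < prev.length := by omega
      have hrowlen : (prev.getD i []).length = H := by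
        rw [List.getD_eq_getElem _ _ hip]
        exact hrlen _ (List.getElem_mem hip)
      have hjs : j < ((prev.getD i []).set (H - 1 - m) ((g.getD m []).getD (W - 1 - i) 0)).length := by
        rw [List.length_set]; omega
      rw [List.getD_eq_getElem _ _ hjs, List.getElem_set]
      by_cases hc : H - 1 - m = j
      · rw [if_pos hc, if_pos (by omega)]
        have : H - 1 - j = m := by omega
        rw [this]
      · rw [if_neg hc]
        have hjp : j < (prev.getD i []).length := by omega
        rw [← List.getD_eq_getElem _ _ hjp, hget i hi j hj]
        by_cases h2 : H - m ≤ j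
        · rw [if_pos h2, if_pos (by omega)]
        · rw [if_neg h2, if_neg (by omega)]

-- ===== VERDICT (by name: the statement is the Claim_ definition above) =====
theorem flip_anti_spec : Claim_equal_flip_anti := by
  intro g _ hpre
  unfold Spec_flip_anti
  by_cases hg : g = []
  · simp [flip_anti, flip_anti_alt, hg]
  · have hall : g.all (fun row => row.length == g.headI.length) = true := by
      simp only [List.all_eq_true, beq_iff_eq]
      exact hpre
    simp only [flip_anti, flip_anti_alt, if_neg hg, hall, if_pos]
    have hHpos : 0 < g.length := List.length_pos_iff.mpr hg
    -- B characterization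
    have hrne : (g.reverse).map List.reverse ≠ [] := by
      simpa using hg
    have hrlen : ∀ r ∈ (g.reverse).map List.reverse, r.length = g.headI.length := by
      intro r hr
      simp only [List.mem_map, List.mem_reverse] at hr
      obtain ⟨s, hs, rfl⟩ := hr
      simpa using hpre s hs
    rw [pvZipStar_char g.headI.length _ hrne hrlen]
    -- A characterization
    have h0len : ((List.range g.headI.length).map
        (fun _ => List.replicate g.length (0 : Int))).length = g.headI.length := by simp
    have h0rows : ∀ row ∈ (List.range g.headI.length).map
        (fun _ => List.replicate g.length (0 : Int)), row.length = g.length := by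
      intro row hrow
      simp only [List.mem_map] at hrow
      obtain ⟨_, _, rfl⟩ := hrow
      simp
    obtain ⟨alen, arows, aget⟩ :=
      pv_outer g g.length g.headI.length _ h0len h0rows g.length (le_refl _)
    apply List.ext_getElem
    · rw [alen]; simp
    · intro i h1 h2
      have hiW : i < g.headI.length := by rwa [alen] at h1
      apply List.ext_getElem
      · have := arows _ (List.getElem_mem h1)
        rw [this]
        simp only [List.getElem_map, List.getElem_range]
        simp
      · intro j hj1 hj2
        have hjH : j < g.length := by
          have := arows _ (List.getElem_mem h1)
          rwa [this] at hj1
        -- A entry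
        have ha := aget i hiW j hjH
        rw [if_pos (by omega)] at ha
        rw [List.getD_eq_getElem _ _ h1] at ha
        rw [List.getD_eq_getElem _ _ hj1] at ha
        rw [ha]
        -- B entry
        simp only [List.getElem_map, List.getElem_range, List.getElem_reverse]
        have hHj : g.length - 1 - j < g.length := by omega
        have hlr : g[g.length - 1 - j].length = g.headI.length :=
          hpre _ (List.getElem_mem hHj)
        rw [pv_rev_getD _ _ (by rw [hlr]; exact hiW), hlr]
        rw [List.getD_eq_getElem _ _ hHj]
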